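-- pv_equiv track=rewrite | github.com/Paulo-Rocha-97/Tese_code | Plot_data/Caudal_ecologico.py | month_x_axes
-- ===== SOURCE A (Python) =====
-- def month_x_axes (X,Time_year):
--
--
--     year_axis = []
--     Z=[]
--     Q=[]
--
--     j=1
--
--     for i in range(len(X)):
--         if j==1 or j==7:
--
--             if j==1:
--
--                 year_axis.append(Time_year[i])
--                 Q.append(i)
--
--         if j==12:
--             j=1
--         else:
--             j=j+1
--
--         Z.append(i)
--
--     return Z,Q,year_axis
-- ===== SOURCE B (Python) =====
-- def month_x_axes(X, Time_year):
--     Z = list(range(len(X)))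
--     Q = list(range(0, len(X), 12))
--     year_axis = [Time_year[i] for i in Q]
--     return Z, Q, year_axis
-- ===== Notes on version B (the rewrite author's own statement) =====
-- stated objective: simpler
-- what changed: Replaces A's stateful month-counter loop (incrementing/wrapping j and testing j==1/j==7/j==12) with direct closed-form construction: Z = range(len(X)), Q = range(0, len(X), 12), and year_axis indexed at the stride-12 positions.
import Mathlib
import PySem

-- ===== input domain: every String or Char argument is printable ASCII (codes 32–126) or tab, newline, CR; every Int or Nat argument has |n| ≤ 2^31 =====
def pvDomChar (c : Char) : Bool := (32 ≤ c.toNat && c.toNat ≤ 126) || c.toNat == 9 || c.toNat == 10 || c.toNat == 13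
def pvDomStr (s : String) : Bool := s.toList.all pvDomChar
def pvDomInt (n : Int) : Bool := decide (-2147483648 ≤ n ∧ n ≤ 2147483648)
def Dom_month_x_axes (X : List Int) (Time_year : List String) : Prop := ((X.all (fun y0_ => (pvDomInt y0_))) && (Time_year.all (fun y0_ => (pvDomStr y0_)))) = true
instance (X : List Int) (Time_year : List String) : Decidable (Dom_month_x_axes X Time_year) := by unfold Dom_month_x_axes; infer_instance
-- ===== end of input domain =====

-- B replaces A's stateful month-counter loop with direct stride-12 range construction (objective: simpler).


-- ===== PORT A =====
-- loop body of A; state = (j, year_axis, Q, Z); Time_year[i] ported as pyGetD with default ""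
-- (Pre_ guarantees the index is in range wherever the loop reads it)
def aStep (Time_year : List String) (s : Int × List String × List Int × List Int) (i : Int) :
    Int × List String × List Int × List Int :=
  let j := s.1
  let year_axis := s.2.1
  let Q := s.2.2.1
  let Z := s.2.2.2
  let (year_axis, Q) :=
    if j = 1 ∨ j = 7 then
      if j = 1 then (year_axis ++ [PySem.List.pyGetD Time_year i ""], Q ++ [i])
      else (year_axis, Q)
    else (year_axis, Q)
  let j := if j = 12 then 1 else j + 1
  (j, year_axis, Q, Z ++ [i])

def month_x_axes (X : List Int) (Time_year : List String) : List Int × List Int × List String :=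
  let st := (PySem.List.pyRange 0 X.length 1).foldl (aStep Time_year) (1, [], [], [])
  (st.2.2.2, st.2.2.1, st.2.1)

-- ===== PORT B =====
def month_x_axes_alt (X : List Int) (Time_year : List String) : List Int × List Int × List String :=
  let Z := PySem.List.pyRange 0 X.length 1
  let Q := PySem.List.pyRange 0 X.length 12
  let year_axis := Q.map (fun i => PySem.List.pyGetD Time_year i "")
  (Z, Q, year_axis)

-- ===== PRECONDITION & SPEC =====
-- Pre_ excludes exactly the inputs where Python A raises IndexError: some index i ≡ 0 (mod 12)
-- below len(X) with Time_year shorter than i+1 (Python B raises there identically).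
def Pre_month_x_axes (X : List Int) (Time_year : List String) : Prop :=
  ∀ i : Nat, i < X.length → i % 12 = 0 → i < Time_year.length
instance (X : List Int) (Time_year : List String) : Decidable (Pre_month_x_axes X Time_year) := by
  unfold Pre_month_x_axes; infer_instance

def pvWitness_month_x_axes : List Int × List String := ([5, -3, 7], ["1990"])

def Spec_month_x_axes (X : List Int) (Time_year : List String) (out : List Int × List Int × List String) : Prop := out = month_x_axes_alt X Time_year
instance (X : List Int) (Time_year : List String) (out : List Int × List Int × List String) : Decidable (Spec_month_x_axes X Time_year out) := by unfold Spec_month_x_axes; infer_instance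

-- ===== CLAIM (what is proved, stated in full; the proofs are below) =====
def Claim_equal_month_x_axes : Prop := ∀ (X : List Int) (Time_year : List String), Dom_month_x_axes X Time_year → Pre_month_x_axes X Time_year → Spec_month_x_axes X Time_year (month_x_axes X Time_year)

-- ===== LEMMAS AND PROOFS =====

-- closed form of the stride-12 range
lemma stride12 (n : Nat) :
    PySem.List.pyRange 0 (n : Int) 12 = (List.range ((n + 11) / 12)).map (fun k : Nat => 12 * (k : Int)) := by
  rw [PySem.List.pyRange_of_pos 0 (n : Int) (by norm_num)]
  have h : (if (0 : Int) < (n : Int) then (((n : Int) - 0 + 12 - 1) / 12).toNat else 0) = (n + 11) / 12 := by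
    split
    · have : ((n : Int) - 0 + 12 - 1) = ((n + 11 : Nat) : Int) := by push_cast; ring
      rw [this]
      omega
    · omega
  rw [h]
  exact List.map_congr_left (fun k _ => by push_cast; ring)

lemma stride12_succ (n : Nat) :
    PySem.List.pyRange 0 ((n : Int) + 1) 12 =
      PySem.List.pyRange 0 (n : Int) 12 ++ (if n % 12 = 0 then [(n : Int)] else []) := by
  have h2 := stride12 (n + 1)
  push_cast at h2
  rw [h2, stride12 n]
  by_cases h : n % 12 = 0
  · have hq : (n + 1 + 11) / 12 = (n + 11) / 12 + 1 := by omega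
    have hv : 12 * ((n + 11) / 12) = n := by omega
    simp [h, hq, List.range_succ]
    omega
  · have hq : (n + 1 + 11) / 12 = (n + 11) / 12 := by omega
    simp [h, hq]

-- loop invariant: after n iterations the state is j = n % 12 + 1 and the three closed-form lists
lemma loopA (Time_year : List String) (n : Nat) :
    (PySem.List.pyRange 0 (n : Int) 1).foldl (aStep Time_year) (1, [], [], []) =
      (((n % 12 : Nat) : Int) + 1,
       (PySem.List.pyRange 0 (n : Int) 12).map (fun i => PySem.List.pyGetD Time_year i ""),
       PySem.List.pyRange 0 (n : Int) 12,
       PySem.List.pyRange 0 (n : Int) 1) := by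
  induction n with
  | zero => simp [PySem.List.pyRange]
  | succ n ih =>
    have hr : PySem.List.pyRange 0 ((n + 1 : Nat) : Int) 1 =
        PySem.List.pyRange 0 (n : Int) 1 ++ [(n : Int)] := by
      exact_mod_cast PySem.List.pyRange_one_succ_right (b := (n : Int)) (by positivity)
    have hq : PySem.List.pyRange 0 ((n + 1 : Nat) : Int) 12 =
        PySem.List.pyRange 0 (n : Int) 12 ++ (if n % 12 = 0 then [(n : Int)] else []) := by
      push_cast
      exact stride12_succ n
    rw [hr, hq, List.foldl_append, ih]
    simp only [List.foldl_cons, List.foldl_nil, aStep]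
    split_ifs with h1 h2 h3 h4 <;>
      simp only [Prod.mk.injEq, List.map_append, List.map_cons, List.map_nil,
        List.append_nil, and_true] <;>
      omega

-- ===== VERDICT (by name: the statement is the Claim_ definition above) =====
theorem month_x_axes_spec : Claim_equal_month_x_axes := by
  intro X Time_year _ _
  unfold Spec_month_x_axes month_x_axes month_x_axes_alt
  rw [loopA]
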